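-- pv_equiv track=rewrite | github.com/Kamila-Samajova/Reversi | reversi.py | count
-- ===== SOURCE A (Python) =====
-- from typing import List, Optional, Tuple
--
-- Playground = List[List[str]]
--
-- def count(playground: Playground) -> Tuple[int, int]:
--     count_x, count_o = 0, 0
--     for row in playground:
--         for symbol in row:
--             if symbol == "X":
--                 count_x += 1
--             elif symbol == "O":
--                 count_o += 1
--     return count_x, count_o
-- ===== SOURCE B (Python) =====
-- from typing import List, Tuple
--
-- Playground = List[List[str]]
--
-- def count(playground: Playground) -> Tuple[int, int]:
--     cells = [symbol for row in playground for symbol in row]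
--     return cells.count("X"), cells.count("O")
-- ===== Notes on version B (the rewrite author's own statement) =====
-- stated objective: idiomatic
-- what changed: Replaced the nested loop with two branch accumulators by flattening the grid once and reading the two totals with list.count, so there is no per-cell if/elif bookkeeping.
import Mathlib
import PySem

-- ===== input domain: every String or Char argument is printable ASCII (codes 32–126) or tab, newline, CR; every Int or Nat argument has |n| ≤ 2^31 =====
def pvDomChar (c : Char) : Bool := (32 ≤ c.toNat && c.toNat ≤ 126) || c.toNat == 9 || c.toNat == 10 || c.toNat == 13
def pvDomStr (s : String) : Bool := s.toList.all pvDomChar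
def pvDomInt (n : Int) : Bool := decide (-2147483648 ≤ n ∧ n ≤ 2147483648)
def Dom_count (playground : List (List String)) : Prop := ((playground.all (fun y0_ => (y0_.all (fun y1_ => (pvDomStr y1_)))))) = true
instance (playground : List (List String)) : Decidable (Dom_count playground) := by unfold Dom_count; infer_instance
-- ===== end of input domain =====

-- B replaces the nested loop with two if/elif accumulators by flattening the grid once and reading the two totals with list.count (idiomatic; same cost).


-- ===== PORT A =====
def count (playground : List (List String)) : Int × Int :=
  playground.foldl
    (fun acc row =>
      row.foldl
        (fun ac symbol =>
          if symbol = "X" then (ac.1 + 1, ac.2)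
          else if symbol = "O" then (ac.1, ac.2 + 1)
          else ac)
        acc)
    (0, 0)

-- ===== PORT B =====
def count_alt (playground : List (List String)) : Int × Int :=
  let cells := playground.flatMap (fun row => row)
  ((cells.count "X" : Int), (cells.count "O" : Int))

-- ===== PRECONDITION & SPEC =====
def Spec_count (playground : List (List String)) (out : Int × Int) : Prop := out = count_alt playground
instance (playground : List (List String)) (out : Int × Int) : Decidable (Spec_count playground out) := by unfold Spec_count; infer_instance

-- ===== CLAIM (what is proved, stated in full; the proofs are below) =====
def Claim_equal_count : Prop := ∀ (playground : List (List String)), Dom_count playground → Spec_count playground (count playground)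

-- ===== LEMMAS AND PROOFS =====

-- ===== VERDICT (by name: the statement is the Claim_ definition above) =====
theorem count_inner (row : List String) (a b : Int) :
    row.foldl
      (fun ac symbol =>
        if symbol = "X" then (ac.1 + 1, ac.2)
        else if symbol = "O" then (ac.1, ac.2 + 1)
        else ac)
      (a, b) = (a + (row.count "X" : Int), b + (row.count "O" : Int)) := by
  induction row generalizing a b with
  | nil => simp
  | cons x xs ih =>
    by_cases hx : x = "X"
    · simp [hx, ih, add_comm, add_left_comm]
    · by_cases ho : x = "O"
      · simp [ho, ih, add_comm, add_left_comm]
      · simp [hx, ho, ih]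

theorem count_outer (pg : List (List String)) (a b : Int) :
    pg.foldl
      (fun acc row =>
        row.foldl
          (fun ac symbol =>
            if symbol = "X" then (ac.1 + 1, ac.2)
            else if symbol = "O" then (ac.1, ac.2 + 1)
            else ac)
          acc)
      (a, b) = (a + ((pg.flatMap (fun row => row)).count "X" : Int),
                b + ((pg.flatMap (fun row => row)).count "O" : Int)) := by
  induction pg generalizing a b with
  | nil => simp
  | cons r rs ih => simp [count_inner, ih, add_assoc, List.flatMap]

theorem count_spec : Claim_equal_count := by
  intro pg _
  unfold Spec_count count count_alt
  simp [count_outer]
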